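-- pv_equiv track=rewrite | github.com/everysoftware/algorithms-course | src/divide_and_conquer/algo/points_and_segments.py | binary_count
-- ===== SOURCE A (Python) =====
-- def binary_count(a, x):
--     start = 0
--     end = len(a) - 1
--     while start <= end:
--         m = (start + end) // 2
--         if a[m] > x:
--             end = m - 1
--         else:
--             start = m + 1
--     return start
-- ===== SOURCE B (Python) =====
-- def binary_count(a, x):
--     # Recursive divide-and-conquer on list slices instead of an index loop:
--     # split at the same midpoint A probes, add the offset of the kept half.
--     if not a:
--         return 0
--     k = (len(a) - 1) // 2
--     if a[k] > x:
--         return binary_count(a[:k], x)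
--     return k + 1 + binary_count(a[k + 1:], x)
-- ===== Notes on version B (the rewrite author's own statement) =====
-- stated objective: alternative
-- what changed: Replaces A's iterative two-index (start/end) while loop by a divide-and-conquer recursion on list slices: split at the same midpoint, recurse on the kept half, add the offset of dropped prefixes.
import Mathlib
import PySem

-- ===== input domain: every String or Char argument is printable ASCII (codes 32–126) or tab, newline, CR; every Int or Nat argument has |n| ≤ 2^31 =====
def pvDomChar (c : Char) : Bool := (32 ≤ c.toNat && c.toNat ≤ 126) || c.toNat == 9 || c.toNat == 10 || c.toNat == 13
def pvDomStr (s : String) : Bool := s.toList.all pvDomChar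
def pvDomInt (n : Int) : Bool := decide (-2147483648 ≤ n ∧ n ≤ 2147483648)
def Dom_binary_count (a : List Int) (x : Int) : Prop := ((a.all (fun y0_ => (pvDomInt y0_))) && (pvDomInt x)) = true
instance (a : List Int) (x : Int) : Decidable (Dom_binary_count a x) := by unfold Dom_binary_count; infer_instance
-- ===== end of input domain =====

-- B replaces A's index-bound while loop by recursion on list slices (alternative decomposition, same cost).

-- ===== PORT A =====
-- A's while loop; fuel only makes the recursion structural (the interval [start,stop]
-- shrinks each iteration, so fuel = initial interval length never runs out).
-- a[m] is ported with pyGet?; the .getD 0 default is unreachable because the loop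
-- keeps 0 ≤ m < a.length whenever entered from binary_count.
def bcLoop (a : List Int) (x : Int) : Nat → Int → Int → Int
  | 0, start, _ => start
  | fuel + 1, start, stop =>
    if start ≤ stop then
      let m := PySem.Int.floordiv (start + stop) 2
      if (PySem.List.pyGet? a m).getD 0 > x then bcLoop a x fuel start (m - 1)
      else bcLoop a x fuel (m + 1) stop
    else start

def binary_count (a : List Int) (x : Int) : Int :=
  bcLoop a x a.length 0 ((a.length : Int) - 1)

-- ===== PORT B =====
-- Source B's recursion on slices; fuel = list length makes it structural (each slice is
-- strictly shorter, so fuel never runs out).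
def bcAltGo (x : Int) : Nat → List Int → Int
  | 0, _ => 0
  | fuel + 1, a =>
    if a = [] then 0
    else
      let k := PySem.Int.floordiv ((a.length : Int) - 1) 2
      if (PySem.List.pyGet? a k).getD 0 > x then
        bcAltGo x fuel (PySem.List.slice a none (some k))
      else
        k + 1 + bcAltGo x fuel (PySem.List.slice a (some (k + 1)) none)

def binary_count_alt (a : List Int) (x : Int) : Int :=
  bcAltGo x a.length a

-- ===== PRECONDITION & SPEC =====
def Spec_binary_count (a : List Int) (x : Int) (out : Int) : Prop := out = binary_count_alt a x
instance (a : List Int) (x : Int) (out : Int) : Decidable (Spec_binary_count a x out) := by unfold Spec_binary_count; infer_instance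

-- ===== CLAIM (what is proved, stated in full; the proofs are below) =====
def Claim_equal_binary_count : Prop := ∀ (a : List Int) (x : Int), Dom_binary_count a x → Spec_binary_count a x (binary_count a x)

-- ===== LEMMAS AND PROOFS =====

-- key invariant: with enough fuel, the loop on [lo,hi] returns lo plus B's answer
-- on the corresponding window of a
theorem bcLoop_eq_alt (n : Nat) (a : List Int) (x : Int) :
    ∀ (fuelA fuelB : Nat) (lo hi : Int), 0 ≤ lo → hi < (a.length : Int) →
    (hi + 1 - lo).toNat = n → n ≤ fuelA → n ≤ fuelB →
    bcLoop a x fuelA lo hi = lo + bcAltGo x fuelB ((a.drop lo.toNat).take n) := by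
  induction n using Nat.strong_induction_on with
  | _ n ih =>
    intro fuelA fuelB lo hi hlo hhi hn hfA hfB
    by_cases h : lo ≤ hi
    · -- loop iterates: n ≥ 1 forces both fuels positive
      have hn1 : 1 ≤ n := by omega
      obtain ⟨fA, rfl⟩ : ∃ fA, fuelA = fA + 1 := ⟨fuelA - 1, by omega⟩
      obtain ⟨fB, rfl⟩ : ∃ fB, fuelB = fB + 1 := ⟨fuelB - 1, by omega⟩
      rw [bcLoop]
      simp only [if_pos h]
      -- midpoint facts
      obtain ⟨hm1, hm2⟩ := PySem.Int.floordiv_two_mid_bounds h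
      set m := PySem.Int.floordiv (lo + hi) 2 with hm
      -- the window s
      set s := (a.drop lo.toNat).take n with hs
      have hslen : s.length = n := by
        simp [hs, List.length_take, List.length_drop]; omega
      have hsne : s ≠ [] := by
        intro h0; rw [h0] at hslen; simp at hslen; omega
      -- k of the bcAltGo call equals m - lo
      have hsl : (s.length : Int) - 1 = hi - lo := by rw [hslen]; omega
      have hk : PySem.Int.floordiv ((s.length : Int) - 1) 2 = m - lo := by
        rw [hsl]
        have e1 := PySem.Int.floordiv_mul_add_mod (lo + hi) 2
        have e2 := PySem.Int.floordiv_mul_add_mod (hi - lo) 2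
        have b1 := PySem.Int.mod_nonneg (a := lo + hi) (b := 2) (by omega)
        have b2 := PySem.Int.mod_lt (a := lo + hi) (b := 2) (by omega)
        have b3 := PySem.Int.mod_nonneg (a := hi - lo) (b := 2) (by omega)
        have b4 := PySem.Int.mod_lt (a := hi - lo) (b := 2) (by omega)
        omega
      -- the probed element agrees: s[m - lo] = a[m]
      have hget : PySem.List.pyGet? s (m - lo) = PySem.List.pyGet? a m := by
        rw [PySem.List.pyGet?_of_nonneg (xs := s) (i := m - lo) (by omega),
          PySem.List.pyGet?_of_nonneg (xs := a) (i := m) (by omega)]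
        rw [hs]
        rw [List.getElem?_take_of_lt (by omega), List.getElem?_drop]
        congr 1
        omega
      rw [bcAltGo]
      simp only [if_neg hsne, hk, hget]
      by_cases hc : (PySem.List.pyGet? a m).getD 0 > x
      · simp only [if_pos hc]
        -- A recurses on [lo, m-1]; B on s[:m-lo], the same window of a
        have hrec := ih (m - lo).toNat (by omega) fA fB lo (m - 1) hlo (by omega)
          (by omega) (by omega) (by omega)
        rw [hrec]
        congr 2
        rw [PySem.List.slice_to (xs := s) (b := m - lo) (by omega), hs, List.take_take]
        congr 1
        omega
      · simp only [if_neg hc]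
        -- A recurses on [m+1, hi]; B on s[m-lo+1:], the same window shifted by lo
        have hrec := ih (hi - m).toNat (by omega) fA fB (m + 1) hi (by omega) hhi
          (by omega) (by omega) (by omega)
        rw [hrec]
        have hdrop : PySem.List.slice s (some (m - lo + 1)) none =
            (a.drop (m + 1).toNat).take (hi - m).toNat := by
          rw [PySem.List.slice_from (xs := s) (a := m - lo + 1) (by omega), hs, List.drop_take,
            List.drop_drop]
          have e1 : lo.toNat + (m - lo + 1).toNat = (m + 1).toNat := by omega
          have e2 : n - (m - lo + 1).toNat = (hi - m).toNat := by omega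
          rw [e1, e2]
        rw [hdrop]
        omega
    · -- loop exits at once: n = 0, the window is empty, both sides give lo
      have hn0 : n = 0 := by omega
      subst hn0
      have hL : bcLoop a x fuelA lo hi = lo := by
        cases fuelA with
        | zero => rfl
        | succ f => rw [bcLoop]; simp [h]
      have hR : bcAltGo x fuelB ((a.drop lo.toNat).take 0) = 0 := by
        cases fuelB with
        | zero => rfl
        | succ f => rw [bcAltGo]; simp
      rw [hL, List.take_zero] at *
      rw [hR]
      omega

-- ===== VERDICT (by name: the statement is the Claim_ definition above) =====
theorem binary_count_spec : Claim_equal_binary_count := by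
  intro a x _
  unfold Spec_binary_count binary_count binary_count_alt
  by_cases ha : a = []
  · subst ha; rfl
  · have hlen : 0 < a.length := List.length_pos_iff.mpr ha
    have := bcLoop_eq_alt a.length a x a.length a.length 0 ((a.length : Int) - 1)
      le_rfl (by omega) (by omega) le_rfl le_rfl
    simpa using this
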